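-- pv_equiv track=rewrite | github.com/vicinity-zw/backend | src/backend/cli.py | getCommonString
-- ===== SOURCE A (Python) =====
-- def getCommonString(line, line_list):
--     line_list = sorted(line_list, key=len)
--     for i in range(len(line) + 1, len(line_list[0]) + 1):
--         for j in line_list:
--             if j.startswith(line_list[0][:i]):
--                 continue
--             else:
--                 return line_list[0][:i - 1]
-- ===== SOURCE B (Python) =====
-- def getCommonString(line, line_list):
--     s = min(line_list, key=len)
--     L = len(s)
--     for k, c in enumerate(s):
--         if any(t[k] != c for t in line_list):
--             L = k
--             break
--     if len(line) >= len(s) or L == len(s):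
--         return None
--     return s[:max(len(line), L)]
-- ===== Notes on version B (the rewrite author's own statement) =====
-- stated objective: faster
-- what changed: B picks the shortest string with min(key=len) and finds the first mismatching column by a single char-wise scan (one comparison per string per column), instead of A's sort by length followed by re-testing an ever-growing prefix with startswith at every length.
import Mathlib
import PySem

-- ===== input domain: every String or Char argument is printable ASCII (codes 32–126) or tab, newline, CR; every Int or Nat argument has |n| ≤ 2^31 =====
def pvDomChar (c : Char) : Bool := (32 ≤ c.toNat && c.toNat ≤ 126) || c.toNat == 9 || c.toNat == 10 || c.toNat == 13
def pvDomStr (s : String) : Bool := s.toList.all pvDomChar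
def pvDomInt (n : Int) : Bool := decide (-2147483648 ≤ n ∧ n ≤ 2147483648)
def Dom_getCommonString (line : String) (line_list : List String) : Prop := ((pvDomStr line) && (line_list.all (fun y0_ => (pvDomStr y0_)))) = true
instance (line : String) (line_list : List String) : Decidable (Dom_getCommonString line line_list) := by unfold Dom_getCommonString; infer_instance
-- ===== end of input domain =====

-- B replaces A's length-sort plus repeated growing-prefix startswith scans by min(key=len)
-- and a single column-wise character scan; equal output on every non-empty line_list.


-- ===== PORT A =====
-- inner loop: 'for j in line_list: if j.startswith(line_list[0][:i]): continue else: return line_list[0][:i-1]'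
def pvInnerA (s0 : List Char) (i : Int) : List String → Option String
  | [] => none
  | j :: rest =>
      if PySem.Chars.startswith j.toList (PySem.List.slice s0 none (some i)) then
        pvInnerA s0 i rest
      else
        some (String.ofList (PySem.List.slice s0 none (some (i - 1))))

-- outer loop: 'for i in range(len(line) + 1, len(line_list[0]) + 1)'
def pvLoopA (ll : List String) (s0 : List Char) : List Int → Option String
  | [] => none
  | i :: rest =>
      match pvInnerA s0 i ll with
      | some r => some r
      | none => pvLoopA ll s0 rest

def getCommonString (line : String) (line_list : List String) : Option String :=
  let ll := PySem.List.sorted line_list (fun t => PySem.Str.len t) false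
  match ll with
  | [] => none
  | s0 :: _ =>
      pvLoopA ll s0.toList
        (PySem.List.pyRange (PySem.Str.len line + 1) (PySem.Str.len s0 + 1) 1)


-- ===== PORT B =====
-- 'for k, c in enumerate(s): if any(t[k] != c for t in line_list): L = k; break'
def pvFirstMismatch (ts : List (List Char)) : Nat → List Char → Option Nat
  | _, [] => none
  | k, c :: rest =>
      if ts.any (fun t => t.getD k ' ' ≠ c) then some k
      else pvFirstMismatch ts (k + 1) rest

def getCommonString_alt (line : String) (line_list : List String) : Option String :=
  match PySem.List.min? line_list (fun t => PySem.Str.len t) with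
  | none => none
  | some s =>
      let sl := s.toList
      let L : Nat := (pvFirstMismatch (line_list.map String.toList) 0 sl).getD sl.length
      if sl.length ≤ line.toList.length ∨ L = sl.length then none
      else some (String.ofList (sl.take (max line.toList.length L)))


-- ===== PRECONDITION & SPEC =====
-- On an empty line_list, A raises IndexError (line_list[0]) and B's min raises ValueError.
def Pre_getCommonString (line : String) (line_list : List String) : Prop := line_list ≠ []
instance (line : String) (line_list : List String) : Decidable (Pre_getCommonString line line_list) := by unfold Pre_getCommonString; infer_instance
def pvWitness_getCommonString : String × List String := ("ab", ["abcd", "abce"])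

def Spec_getCommonString (line : String) (line_list : List String) (out : Option String) : Prop := out = getCommonString_alt line line_list
instance (line : String) (line_list : List String) (out : Option String) : Decidable (Spec_getCommonString line line_list out) := by unfold Spec_getCommonString; infer_instance

-- ===== CLAIM (what is proved, stated in full; the proofs are below) =====
def Claim_equal_getCommonString : Prop := ∀ (line : String) (line_list : List String), Dom_getCommonString line line_list → Pre_getCommonString line line_list → Spec_getCommonString line line_list (getCommonString line line_list)

-- ===== LEMMAS AND PROOFS =====
-- mismatch test at column k
def pvR (ts : List (List Char)) (sl : List Char) (k : Nat) : Bool :=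
  ts.any (fun t => t.getD k ' ' ≠ sl.getD k ' ')

theorem pv_head?_foldl_insertBy {α κ : Type} [LinearOrder κ] (key : α → κ) (l : List α) :
    ∀ acc : List α,
    (l.foldl (fun a x => PySem.List.insertBy (fun a b => decide (key a < key b)) x a) acc).head? =
    l.foldl (fun m? x => match m? with
      | none => some x
      | some m => if key x < key m then some x else some m) acc.head? := by
  induction l with
  | nil => intro acc; rfl
  | cons x t ih =>
      intro acc
      simp only [List.foldl_cons, ih]
      congr 1
      cases acc with
      | nil => rfl
      | cons y ys =>
          simp only [PySem.List.insertBy, List.head?]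
          by_cases h : key x < key y <;> simp [h]

theorem pv_head_sorted_eq_min? {α κ : Type} [LinearOrder κ] (xs : List α) (key : α → κ) :
    (PySem.List.sorted xs key false).head? = PySem.List.min? xs key := by
  rw [PySem.List.sorted_eq_foldl_insertBy, pv_head?_foldl_insertBy]
  rfl

theorem pv_fm_spec (ts : List (List Char)) (sl : List Char) :
    ∀ (n k : Nat), k + n = sl.length →
    (pvFirstMismatch ts k (sl.drop k) = none → ∀ j, k ≤ j → j < sl.length → pvR ts sl j = false) ∧
    (∀ m, pvFirstMismatch ts k (sl.drop k) = some m →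
       k ≤ m ∧ m < sl.length ∧ pvR ts sl m = true ∧ ∀ j, k ≤ j → j < m → pvR ts sl j = false) := by
  intro n
  induction n with
  | zero =>
      intro k hk
      have hd : sl.drop k = [] := by
        apply List.drop_eq_nil_of_le; omega
      rw [hd]
      constructor
      · intro _ j hj1 hj2; omega
      · intro m hm; simp [pvFirstMismatch] at hm
  | succ n ih =>
      intro k hk
      have hklt : k < sl.length := by omega
      have hd : sl.drop k = sl[k] :: sl.drop (k+1) := List.drop_eq_getElem_cons hklt
      have hceq : sl[k] = sl.getD k ' ' := by
        rw [List.getD_eq_getElem?_getD, List.getElem?_eq_getElem hklt]; rfl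
      rw [hd]
      have hstep : pvFirstMismatch ts k (sl[k] :: sl.drop (k+1)) =
          if pvR ts sl k then some k else pvFirstMismatch ts (k+1) (sl.drop (k+1)) := by
        simp only [pvFirstMismatch, pvR, hceq]
        rfl
      obtain ⟨ihn, ihs⟩ := ih (k+1) (by omega)
      by_cases hR : pvR ts sl k
      · rw [hstep, if_pos hR]
        constructor
        · intro h; exact absurd h (by simp)
        · intro m hm
          injection hm with hm; subst hm
          exact ⟨le_refl _, hklt, hR, by intro j h1 h2; omega⟩
      · rw [hstep, if_neg hR]
        constructor
        · intro h j hj1 hj2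
          rcases Nat.eq_or_lt_of_le hj1 with rfl | hlt
          · simpa using hR
          · exact ihn h j hlt hj2
        · intro m hm
          obtain ⟨h1, h2, h3, h4⟩ := ihs m hm
          refine ⟨by omega, h2, h3, ?_⟩
          intro j hj1 hj2
          rcases Nat.eq_or_lt_of_le hj1 with rfl | hlt
          · simpa using hR
          · exact h4 j hlt hj2

-- startswith on a take-prefix, pointwise
theorem pv_startswith_take (sl j : List Char) (hj : sl.length ≤ j.length) (i : Nat) (hi : i ≤ sl.length) :
    PySem.Chars.startswith j (sl.take i) = true ↔ ∀ k, k < i → j.getD k ' ' = sl.getD k ' ' := by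
  rw [PySem.Chars.startswith_iff, List.prefix_iff_eq_take]
  have hlen : (sl.take i).length = i := by simp; omega
  rw [hlen]
  constructor
  · intro h k hk
    have hkj : k < j.length := by omega
    have hks : k < sl.length := by omega
    have h' := congrArg (fun l => l[k]?) h
    simp only [List.getElem?_take] at h'
    rw [if_pos hk, if_pos hk, List.getElem?_eq_getElem hks, List.getElem?_eq_getElem hkj] at h'
    rw [List.getD_eq_getElem?_getD, List.getElem?_eq_getElem hkj,
        List.getD_eq_getElem?_getD, List.getElem?_eq_getElem hks]
    simpa using h'.symm
  · intro h
    apply List.ext_getElem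
    · simp; omega
    · intro k h1 h2
      have hk : k < i := by simp at h1; omega
      have hkj : k < j.length := by omega
      have hks : k < sl.length := by omega
      have := h k hk
      rw [List.getD_eq_getElem?_getD, List.getElem?_eq_getElem hkj,
          List.getD_eq_getElem?_getD, List.getElem?_eq_getElem hks] at this
      simp only [List.getElem_take]
      simpa using this.symm

theorem pv_innerA_eq (sl : List Char) (i : Int) : ∀ js : List String,
    pvInnerA sl i js =
      if js.all (fun j => PySem.Chars.startswith j.toList (PySem.List.slice sl none (some i)))
      then none else some (String.ofList (PySem.List.slice sl none (some (i - 1)))) := by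
  intro js
  induction js with
  | nil => rfl
  | cons j rest ih =>
      simp only [pvInnerA, List.all_cons]
      by_cases h : PySem.Chars.startswith j.toList (PySem.List.slice sl none (some i)) <;>
        simp [h, ih]

def pvQ (ll' : List String) (sl : List Char) (i : Nat) : Bool :=
  ll'.all (fun j => PySem.Chars.startswith j.toList (PySem.List.slice sl none (some (i:Int))))

theorem pv_pyRange_nil (a b : Int) (h : b ≤ a) : PySem.List.pyRange a b 1 = [] := by
  simp [PySem.List.pyRange]; omega

theorem pv_loopA_none_of_all (ll' : List String) (sl : List Char)
    (hall : ∀ i : Nat, 1 ≤ i → i ≤ sl.length → pvQ ll' sl i = true) :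
    ∀ (n a : Nat), 1 ≤ a → sl.length + 1 - a ≤ n →
    pvLoopA ll' sl (PySem.List.pyRange (a:Int) ((sl.length:Int)+1) 1) = none := by
  intro n
  induction n with
  | zero =>
      intro a ha hle
      rw [pv_pyRange_nil _ _ (by omega)]
      rfl
  | succ n ih =>
      intro a ha hle
      by_cases hab : a ≤ sl.length
      · rw [PySem.List.pyRange_one_cons (by exact_mod_cast (by omega : (a:Int) < (sl.length:Int)+1))]
        simp only [pvLoopA]
        rw [pv_innerA_eq]
        have hq := hall a ha hab
        unfold pvQ at hq
        rw [hq]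
        simp only []
        have : ((a:Int)+1) = (((a+1:Nat)):Int) := by push_cast; ring
        rw [this]
        exact ih (a+1) (by omega) (by omega)
      · rw [pv_pyRange_nil _ _ (by exact_mod_cast (by omega : ((sl.length:Int))+1 ≤ (a:Int)))]
        rfl

theorem pv_loopA_some_of_mismatch (ll' : List String) (sl : List Char) (m : Nat)
    (hm : m < sl.length)
    (hQ : ∀ i : Nat, 1 ≤ i → i ≤ sl.length → (pvQ ll' sl i = true ↔ i ≤ m)) :
    ∀ (n a : Nat), 1 ≤ a → sl.length + 1 - a ≤ n →
    pvLoopA ll' sl (PySem.List.pyRange (a:Int) ((sl.length:Int)+1) 1) =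
      if a ≤ sl.length then some (String.ofList (sl.take (max (a-1) m))) else none := by
  intro n
  induction n with
  | zero =>
      intro a ha hle
      rw [pv_pyRange_nil _ _ (by omega), if_neg (by omega)]
      rfl
  | succ n ih =>
      intro a ha hle
      by_cases hab : a ≤ sl.length
      · rw [PySem.List.pyRange_one_cons (by exact_mod_cast (by omega : (a:Int) < (sl.length:Int)+1))]
        simp only [pvLoopA]
        rw [pv_innerA_eq]
        by_cases ham : a ≤ m
        · have hq : pvQ ll' sl a = true := (hQ a ha hab).2 ham
          unfold pvQ at hq
          rw [hq]
          have hcast : ((a:Int)+1) = (((a+1:Nat)):Int) := by push_cast; ring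
          have e1 : a + 1 - 1 = a := by omega
          have e2 : max a m = m := by omega
          have e3 : max (a-1) m = m := by omega
          rw [hcast, ih (a+1) (by omega) (by omega), if_pos (show a + 1 ≤ sl.length by omega),
              e1, e2, if_pos hab, e3]
          rfl
        · have hq : pvQ ll' sl a = false := by
            have htmp := hQ a ha hab
            rcases Bool.eq_false_or_eq_true (pvQ ll' sl a) with h | h
            · exact absurd (htmp.1 h) ham
            · exact h
          unfold pvQ at hq
          rw [hq]
          have hcast : ((a:Int)-1) = (((a-1:Nat)):Int) := by omega
          have e : max (a-1) m = a - 1 := by omega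
          rw [hcast, PySem.List.slice_to_natCast, if_pos hab, e]
          rfl
      · rw [pv_pyRange_nil _ _ (by exact_mod_cast (by omega : ((sl.length:Int))+1 ≤ (a:Int))), if_neg hab]
        rfl

theorem pv_Q_iff_cols (line_list ll' : List String) (sl : List Char)
    (hmem : ∀ j, j ∈ ll' ↔ j ∈ line_list)
    (hlen : ∀ j ∈ line_list, sl.length ≤ j.toList.length)
    (i : Nat) (hi : i ≤ sl.length) :
    pvQ ll' sl i = true ↔ ∀ k, k < i → pvR (line_list.map String.toList) sl k = false := by
  unfold pvQ
  rw [PySem.List.slice_to_natCast, List.all_eq_true]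
  constructor
  · intro h k hk
    rw [pvR, List.any_eq_false]
    intro t ht
    rw [List.mem_map] at ht
    obtain ⟨j, hj, rfl⟩ := ht
    have hsw := h j ((hmem j).2 hj)
    rw [pv_startswith_take sl j.toList (hlen j hj) i hi] at hsw
    simpa using hsw k hk
  · intro h j hjmem
    have hj : j ∈ line_list := (hmem j).1 hjmem
    rw [pv_startswith_take sl j.toList (hlen j hj) i hi]
    intro k hk
    have hk2 := h k hk
    rw [pvR, List.any_eq_false] at hk2
    have := hk2 j.toList (List.mem_map_of_mem hj)
    simpa using this

theorem pv_main (line : String) (line_list : List String) (hpre : line_list ≠ []) :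
    getCommonString line line_list = getCommonString_alt line line_list := by
  obtain ⟨s0, tl, hll⟩ : ∃ s0 tl,
      PySem.List.sorted line_list (fun t => PySem.Str.len t) false = s0 :: tl := by
    rcases h : PySem.List.sorted line_list (fun t => PySem.Str.len t) false with _ | ⟨s0, tl⟩
    · exact absurd ((PySem.List.sorted_eq_nil_iff _ _ _).1 h) hpre
    · exact ⟨s0, tl, rfl⟩
  have hmin : PySem.List.min? line_list (fun t => PySem.Str.len t) = some s0 := by
    rw [← pv_head_sorted_eq_min?, hll]; rfl
  have hmem : ∀ j, j ∈ (s0 :: tl) ↔ j ∈ line_list := by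
    intro j; rw [← hll]; exact PySem.List.mem_sorted _ _ _ _
  have hlen : ∀ j ∈ line_list, s0.toList.length ≤ j.toList.length := by
    intro j hj
    have := PySem.List.key_head_sorted_le line_list (fun t => PySem.Str.len t) hll j hj
    simp only [PySem.Str.len] at this
    exact_mod_cast this
  have hA : getCommonString line line_list =
      pvLoopA (s0 :: tl) s0.toList
        (PySem.List.pyRange ((line.toList.length : Int) + 1) ((s0.toList.length : Int) + 1) 1) := by
    unfold getCommonString
    rw [hll]
    simp [PySem.Str.len]
  have hB : getCommonString_alt line line_list =
      (let L : Nat := (pvFirstMismatch (line_list.map String.toList) 0 s0.toList).getD s0.toList.length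
       if s0.toList.length ≤ line.toList.length ∨ L = s0.toList.length then none
       else some (String.ofList (s0.toList.take (max line.toList.length L)))) := by
    unfold getCommonString_alt
    rw [hmin]
  rw [hA, hB]
  set sl := s0.toList with hsl
  set ts := line_list.map String.toList with hts
  have hcast : ((line.toList.length : Int) + 1) = (((line.toList.length + 1 : Nat)) : Int) := by
    push_cast; ring
  rw [hcast]
  rcases hfm : pvFirstMismatch ts 0 sl with _ | m
  · -- no mismatch: both none
    have hnone := (pv_fm_spec ts sl sl.length 0 (by omega)).1 (by simpa using hfm)
    have hall : ∀ i : Nat, 1 ≤ i → i ≤ sl.length → pvQ (s0 :: tl) sl i = true := by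
      intro i h1 h2
      rw [pv_Q_iff_cols line_list (s0 :: tl) sl hmem hlen i h2]
      intro k hk
      exact hnone k (by omega) (by omega)
    rw [pv_loopA_none_of_all (s0 :: tl) sl hall (sl.length + 1) (line.toList.length + 1)
        (by omega) (by omega)]
    simp
  · -- first mismatch at column m
    obtain ⟨-, hmlt, hRm, hbelow⟩ := (pv_fm_spec ts sl sl.length 0 (by omega)).2 m (by simpa using hfm)
    have hQ : ∀ i : Nat, 1 ≤ i → i ≤ sl.length → (pvQ (s0 :: tl) sl i = true ↔ i ≤ m) := by
      intro i h1 h2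
      rw [pv_Q_iff_cols line_list (s0 :: tl) sl hmem hlen i h2]
      constructor
      · intro h
        by_contra hgt
        have := h m (by omega)
        rw [hRm] at this
        exact absurd this (by simp)
      · intro h k hk
        exact hbelow k (by omega) (by omega)
    rw [pv_loopA_some_of_mismatch (s0 :: tl) sl m hmlt hQ (sl.length + 1)
        (line.toList.length + 1) (by omega) (by omega)]
    have e1 : line.toList.length + 1 - 1 = line.toList.length := by omega
    rw [e1]
    simp only [Option.getD_some]
    by_cases hc : line.toList.length + 1 ≤ sl.length
    · rw [if_pos hc, if_neg (by omega)]
    · rw [if_neg hc, if_pos (Or.inl (by omega))]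

-- ===== VERDICT (by name: the statement is the Claim_ definition above) =====
theorem getCommonString_spec : Claim_equal_getCommonString := by
  intro line line_list _ hpre
  unfold Spec_getCommonString
  exact pv_main line line_list hpre
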